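-- pv_equiv track=rewrite | github.com/pypi-data/pypi-mirror-238 | packages/biocutils/biocutils-0.0.7.tar.gz/biocutils-0.0.7/src/biocutils/map_to_index.py | map_to_index
-- ===== SOURCE A (Python) =====
-- from typing import Sequence, Literal
--
-- DUPLICATE_METHOD = Literal["first", "last"]
--
-- def map_to_index(x: Sequence, duplicate_method: DUPLICATE_METHOD = "first") -> dict:
--     """Create a dictionary to map the values of a sequence to its positional indices.
--
--     Args:
--         x (Sequence): Sequence of hashable values.
--
--         duplicate_method (DUPLICATE_METHOD): Whether to consider the first or
--             last occurrence of a duplicated value in ``x``.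
--
--     Returns:
--         dict: Dictionary that maps values of ``x`` to their position inside ``x``.
--     """
--     first_tie = duplicate_method == "first"
--
--     mapping = {}
--     for i, val in enumerate(x):
--         if val is not None:
--             if not first_tie or val not in mapping:
--                 mapping[val] = i
--
--     return mapping
-- ===== SOURCE B (Python) =====
-- def map_to_index(x, duplicate_method="first"):
--     # Two phases, no membership test: a direction-chosen overwrite comprehension
--     # picks the index per value (reversed -> first occurrence wins, forward ->
--     # last occurrence wins); dict.fromkeys gives the first-occurrence key order.
--     seq = [(i, v) for i, v in enumerate(x) if v is not None]
--     if duplicate_method == "first":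
--         vals = {v: i for i, v in reversed(seq)}
--     else:
--         vals = {v: i for i, v in seq}
--     return {v: vals[v] for v in dict.fromkeys(v for _, v in seq)}
-- ===== Notes on version B (the rewrite author's own statement) =====
-- stated objective: alternative
-- what changed: B drops A's membership-tested conditional write: it picks the index per value with an unconditional overwrite comprehension whose direction decides ties (reversed for 'first', forward for 'last') and restores the first-occurrence key order with an ordered dedup (dict.fromkeys).
import Mathlib
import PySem

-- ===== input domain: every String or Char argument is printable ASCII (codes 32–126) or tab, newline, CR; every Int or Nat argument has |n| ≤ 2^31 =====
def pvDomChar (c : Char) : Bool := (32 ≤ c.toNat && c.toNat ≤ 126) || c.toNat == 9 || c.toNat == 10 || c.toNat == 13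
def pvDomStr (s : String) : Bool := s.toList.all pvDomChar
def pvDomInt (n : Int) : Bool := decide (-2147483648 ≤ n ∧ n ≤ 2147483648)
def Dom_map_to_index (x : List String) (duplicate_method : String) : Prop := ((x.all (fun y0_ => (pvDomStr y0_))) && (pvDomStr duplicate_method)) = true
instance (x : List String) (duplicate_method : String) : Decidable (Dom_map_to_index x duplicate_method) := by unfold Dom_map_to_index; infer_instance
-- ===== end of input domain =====

-- B replaces A's single stateful pass with a membership-tested write by two phases: a
-- direction-chosen unconditional overwrite picks the index per value, an ordered dedup
-- gives the key order (alternative decomposition, same O(n) cost).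

-- ===== PORT A =====
-- literal port of A; the `val is not None` guard is vacuously true here: the elements are
-- strings (a String is never Python's None), so it is dropped.
def map_to_index (x : List String) (duplicate_method : String) : List (String × Int) :=
  let first_tie := duplicate_method == "first"
  let mapping : PySem.Dict String Int :=
    (PySem.List.enumerate x).foldl
      (fun d p => if !first_tie || !(d.contains p.2) then d.insert p.2 p.1 else d)
      PySem.Dict.empty
  mapping.items

-- ===== PORT B =====
-- the `if v is not None` filter in seq is vacuously true for strings, so seq = enumerate x;
-- dict.fromkeys(...) ordered dedup = PySem.List.dedup; vals[v] = getD v 0 is exact here: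
-- every key v comes from seq, so it is present in vals (the lookup cannot raise KeyError).
def map_to_index_alt (x : List String) (duplicate_method : String) : List (String × Int) :=
  let seq := PySem.List.enumerate x
  let vals : PySem.Dict String Int :=
    if duplicate_method == "first" then
      seq.reverse.foldl (fun d p => d.insert p.2 p.1) PySem.Dict.empty
    else
      seq.foldl (fun d p => d.insert p.2 p.1) PySem.Dict.empty
  (PySem.List.dedup (seq.map (·.2))).map (fun v => (v, vals.getD v 0))

-- ===== PRECONDITION & SPEC =====
def Spec_map_to_index (x : List String) (duplicate_method : String) (out : List (String × Int)) : Prop := out = map_to_index_alt x duplicate_method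
instance (x : List String) (duplicate_method : String) (out : List (String × Int)) : Decidable (Spec_map_to_index x duplicate_method out) := by unfold Spec_map_to_index; infer_instance

-- ===== CLAIM (what is proved, stated in full; the proofs are below) =====
def Claim_equal_map_to_index : Prop := ∀ (x : List String) (duplicate_method : String), Dom_map_to_index x duplicate_method → Spec_map_to_index x duplicate_method (map_to_index x duplicate_method)

-- ===== LEMMAS AND PROOFS =====

-- A's conditional write for duplicate_method == "first" is dict.setdefault
lemma cond_insert_eq_setdefault :
    (fun (d : PySem.Dict String Int) (p : Int × String) =>
        if !(d.contains p.2) then d.insert p.2 p.1 else d)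
    = fun d p => d.setdefault p.2 p.1 := by
  funext d p
  by_cases hc : d.contains p.2 = true
  · simp [hc, PySem.Dict.setdefault_of_contains]
  · simp [hc, PySem.Dict.setdefault_of_not_contains]

-- lookup after A's "first" loop: existing entries win, otherwise the first index
lemma firstFold_get? (x : List String) (s : Int) (d : PySem.Dict String Int) (v : String) :
    ((PySem.List.enumerate x s).foldl (fun d p => d.setdefault p.2 p.1) d).get? v =
      match d.get? v with
      | some w => some w
      | none => (PySem.List.index? x v).map (fun j => s + (j : Int)) := by
  induction x generalizing s d with
  | nil =>
    simp [PySem.List.enumerate, PySem.List.index?]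
    cases d.get? v <;> rfl
  | cons a tl ih =>
    rw [PySem.List.enumerate_cons]
    simp only [List.foldl_cons]
    rw [ih]
    by_cases hv : v = a
    · subst hv
      rw [PySem.Dict.get?_setdefault_self]
      simp only [PySem.List.index?, List.idxOf?_cons, beq_iff_eq]
      cases hd : d.get? v <;> simp
    · rw [PySem.Dict.get?_setdefault_of_ne _ _ hv]
      simp only [PySem.List.index?, List.idxOf?_cons, beq_iff_eq,
        if_neg (fun h => hv (Eq.symm h))]
      cases hd : d.get? v with
      | some w => simp
      | none =>
        cases hj : List.idxOf? v tl <;> simp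
        · ring_nf

-- lookup after B's reversed overwrite loop: the first index wins
lemma revFold_get? (x : List String) (s : Int) (d : PySem.Dict String Int) (v : String) :
    ((PySem.List.enumerate x s).reverse.foldl (fun d p => d.insert p.2 p.1) d).get? v =
      match PySem.List.index? x v with
      | some j => some (s + (j : Int))
      | none => d.get? v := by
  induction x generalizing s d with
  | nil =>
    simp [PySem.List.enumerate, PySem.List.index?]
  | cons a tl ih =>
    rw [PySem.List.enumerate_cons]
    simp only [List.reverse_cons, List.foldl_append, List.foldl_cons, List.foldl_nil]
    rw [PySem.Dict.get?_insert, ih]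
    by_cases hv : v = a
    · subst hv
      simp [PySem.List.index?, List.idxOf?_cons]
    · simp only [if_neg hv, PySem.List.index?, List.idxOf?_cons, beq_iff_eq,
        if_neg (fun h => hv (Eq.symm h))]
      cases hj : List.idxOf? v tl <;> simp
      · ring_nf

-- key order after A's "first" loop
lemma keys_setdefault_fold (l : List (Int × String)) (d : PySem.Dict String Int) :
    (l.foldl (fun d p => d.setdefault p.2 p.1) d).keys
      = PySem.Set.update d.keys (l.map (·.2)) := by
  induction l generalizing d with
  | nil => simp [PySem.Set.update_nil]
  | cons p l ih =>
    simp only [List.foldl_cons, List.map_cons, PySem.Set.update_cons]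
    rw [ih]
    congr 1
    rw [PySem.Dict.keys_setdefault]
    simp only [PySem.Set.add]
    rw [PySem.Dict.contains_eq_decide_mem_keys]
    by_cases hm : p.2 ∈ d.keys <;> simp [hm]

lemma map_to_index_eq_alt (x : List String) (dm : String) :
    map_to_index x dm = map_to_index_alt x dm := by
  unfold map_to_index map_to_index_alt
  simp only [PySem.List.map_snd_enumerate]
  cases h : (dm == "first") with
  | true =>
    simp only [Bool.not_true, Bool.false_or, if_true]
    rw [cond_insert_eq_setdefault]
    have hkeys : ((PySem.List.enumerate x).foldl (fun d p => d.setdefault p.2 p.1)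
        PySem.Dict.empty).keys = PySem.Set.ofList x := by
      rw [keys_setdefault_fold]
      rw [PySem.Dict.keys_empty, PySem.List.map_snd_enumerate, PySem.Set.update_nil_left]
    have hnd := hkeys ▸ PySem.Set.nodup_ofList x
    rw [PySem.Dict.items_eq_map_keys _ hnd 0, hkeys]
    show List.map _ (PySem.List.dedup x) = _
    apply List.map_congr_left
    intro v hv
    have hvx : v ∈ x := (PySem.Set.mem_ofList x v).mp hv
    obtain ⟨j, hj⟩ := Option.isSome_iff_exists.mp (List.isSome_idxOf?.mpr hvx)
    rw [PySem.Dict.getD_eq_get?_getD, firstFold_get?, PySem.Dict.get?_empty]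
    rw [PySem.Dict.getD_eq_get?_getD, revFold_get?]
    simp [PySem.List.index?, hj]
  | false =>
    simp only [Bool.not_false, Bool.true_or, if_true, Bool.false_eq_true, if_false]
    have hkeys : ((PySem.List.enumerate x).foldl (fun d p => d.insert p.2 p.1)
        PySem.Dict.empty).keys = PySem.Set.ofList x := by
      rw [PySem.Dict.keys_foldl_insert_key (PySem.List.enumerate x) (·.2) (fun d p => p.1)]
      rw [PySem.Dict.keys_empty, PySem.List.map_snd_enumerate, PySem.Set.update_nil_left]
    have hnd := hkeys ▸ PySem.Set.nodup_ofList x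
    rw [PySem.Dict.items_eq_map_keys _ hnd 0, hkeys]
    rfl

-- ===== VERDICT (by name: the statement is the Claim_ definition above) =====
theorem map_to_index_spec : Claim_equal_map_to_index := by
  intro x dm _hdom
  unfold Spec_map_to_index
  exact map_to_index_eq_alt x dm
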